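-- pv_equiv track=rewrite | github.com/nikunjpanchal22/code_clone_classification | python_t1_t2_full/Gpt_false_pair_3120.py | extendedString_v3
-- ===== SOURCE A (Python) =====
-- def extendedString_v3(str1, str2) :
-- 	a = str1
-- 	b = str2
-- 	c = ""
-- 	if len(a) == len(b) :
-- 		return "".join(i for j in zip(str1, str2) for i in j)
-- 	elif len(a) < len(b) :
-- 		a = a + a [- 1] * (len(b) - len(a))
-- 		return extendedString_v3(a, b)
-- 	else :
-- 		b = b + b [- 1] * (len(a) - len(b))
-- 		return extendedString_v3(a, b)
-- ===== SOURCE B (Python) =====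
-- def extendedString_v3(str1, str2):
--     # Virtual padding: never build padded copies; clamp the index into each
--     # string so positions past its end read its last character.
--     n = max(len(str1), len(str2))
--     return "".join(str1[min(i, len(str1) - 1)] + str2[min(i, len(str2) - 1)]
--                    for i in range(n))
-- ===== Notes on version B (the rewrite author's own statement) =====
-- stated objective: simpler
-- what changed: B never pads and never recurses: instead of A's copy-and-pad of the shorter string followed by a recursive self-call and zip, B reads both strings directly with a clamped index min(i, len-1) over a single range(max_len), so positions past a string's end yield its last character virtually.
import Mathlib
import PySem

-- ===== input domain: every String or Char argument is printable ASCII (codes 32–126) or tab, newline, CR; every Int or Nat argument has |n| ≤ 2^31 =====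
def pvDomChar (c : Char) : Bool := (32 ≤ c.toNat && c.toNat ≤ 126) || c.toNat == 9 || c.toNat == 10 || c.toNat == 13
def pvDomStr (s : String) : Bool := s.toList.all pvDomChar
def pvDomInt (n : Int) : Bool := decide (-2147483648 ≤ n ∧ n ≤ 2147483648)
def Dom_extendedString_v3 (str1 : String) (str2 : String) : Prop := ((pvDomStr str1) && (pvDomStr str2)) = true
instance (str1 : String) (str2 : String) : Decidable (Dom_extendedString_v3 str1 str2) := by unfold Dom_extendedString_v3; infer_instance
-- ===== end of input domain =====

-- B drops A's copy-and-pad plus recursive self-call: one pass over range(max_len) reading each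
-- string through a clamped index min(i, len-1), so no padded string is ever built (objective: simpler).

-- ===== PORT A =====
-- A's recursion on the two character lists; s[-1] ported via PySem.List.pyGet? s (-1)
-- (outside Pre_ that is none and Python raises IndexError; the port defaults it, unreachable inside Pre_).
def pvGoA (a : List Char) (b : List Char) : List Char :=
  if a.length = b.length then
    (a.zip b).flatMap (fun j => [j.1, j.2])
  else if a.length < b.length then
    pvGoA (a ++ List.replicate (b.length - a.length) ((PySem.List.pyGet? a (-1)).getD ' ')) b
  else
    pvGoA a (b ++ List.replicate (a.length - b.length) ((PySem.List.pyGet? b (-1)).getD ' '))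
termination_by (b.length - a.length) + (a.length - b.length)
decreasing_by
  · simp [List.length_append, List.length_replicate]; omega
  · simp [List.length_append, List.length_replicate]; omega

def extendedString_v3 (str1 : String) (str2 : String) : String :=
  String.mk (pvGoA str1.toList str2.toList)

-- ===== PORT B =====
-- str[min(i, len-1)] ported as pyGet? at the clamped Int index (none = IndexError, outside Pre_).
def extendedString_v3_alt (str1 : String) (str2 : String) : String :=
  let a := str1.toList
  let b := str2.toList
  let n := max a.length b.length
  String.mk ((List.range n).flatMap (fun (i : Nat) =>
    [(PySem.List.pyGet? a (min (i : Int) ((a.length : Int) - 1))).getD ' ',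
     (PySem.List.pyGet? b (min (i : Int) ((b.length : Int) - 1))).getD ' ']))

-- ===== PRECONDITION & SPEC =====
-- Pre_ excludes exactly the inputs on which Python A raises IndexError: lengths differ and the
-- shorter string is empty (so s[-1] is taken on "").
def Pre_extendedString_v3 (str1 : String) (str2 : String) : Prop :=
  str1.toList.length = str2.toList.length ∨ (str1.toList ≠ [] ∧ str2.toList ≠ [])
instance (str1 : String) (str2 : String) : Decidable (Pre_extendedString_v3 str1 str2) := by
  unfold Pre_extendedString_v3; infer_instance

def pvWitness_extendedString_v3 : String × String := ("ab", "xyz")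

def Spec_extendedString_v3 (str1 : String) (str2 : String) (out : String) : Prop := out = extendedString_v3_alt str1 str2
instance (str1 : String) (str2 : String) (out : String) : Decidable (Spec_extendedString_v3 str1 str2 out) := by unfold Spec_extendedString_v3; infer_instance

-- ===== CLAIM =====
def Claim_equal_extendedString_v3 : Prop := ∀ (str1 : String) (str2 : String), Dom_extendedString_v3 str1 str2 → Pre_extendedString_v3 str1 str2 → Spec_extendedString_v3 str1 str2 (extendedString_v3 str1 str2)

-- ===== LEMMAS AND PROOFS =====

-- B's index pass over two equal-length lists produces A's zip-flatten interleaving.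
lemma pv_range_interleave : ∀ (a b : List Char), a.length = b.length →
    (List.range a.length).flatMap (fun i => [a.getD i ' ', b.getD i ' '])
      = (a.zip b).flatMap (fun j => [j.1, j.2]) := by
  intro a
  induction a with
  | nil => intro b h; cases b <;> simp_all
  | cons x a' ih =>
    intro b h
    cases b with
    | nil => simp at h
    | cons y b' =>
      simp only [List.length_cons, List.range_succ_eq_map, List.flatMap_cons, List.flatMap_map,
        List.getD_cons_succ, List.getD_cons_zero]
      have := ih b' (by simpa using h)
      simp only [List.flatMap] at this ⊢
      rw [this]
      simp

-- Reading the PADDED list at i equals reading the original list at the CLAMPED index.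
lemma pv_clamp_eq_pad (a : List Char) (n : Nat) (ha : a ≠ []) (hle : a.length ≤ n)
    (i : Nat) (hi : i < n) :
    (PySem.List.pyGet? a (min (i : Int) ((a.length : Int) - 1))).getD ' '
      = (a ++ List.replicate (n - a.length) ((PySem.List.pyGet? a (-1)).getD ' ')).getD i ' ' := by
  have hlen : 0 < a.length := List.length_pos_iff.mpr ha
  by_cases hil : i < a.length
  · have hmin : min (i : Int) ((a.length : Int) - 1) = (i : Int) := by omega
    rw [hmin, PySem.List.pyGet?_natCast]
    rw [List.getD_append _ _ _ _ hil]
    simp [List.getD, hil]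
  · have hmin : min (i : Int) ((a.length : Int) - 1) = ((a.length - 1 : Nat) : Int) := by
      omega
    rw [hmin, PySem.List.pyGet?_natCast]
    have h1 : a[a.length - 1]? = some (a.getLast ha) := by
      rw [List.getLast_eq_getElem]
      exact List.getElem?_eq_getElem _
    have h2 : (PySem.List.pyGet? a (-1)).getD ' ' = a.getLast ha := by
      rw [PySem.List.pyGet?_neg_one, List.getLast?_eq_getLast_of_ne_nil ha]
      rfl
    rw [h1]
    have : i - a.length < n - a.length := by omega
    rw [List.getD_eq_getElem?_getD, List.getElem?_append_right (by omega),
      List.getElem?_replicate, if_pos this]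
    simp [h2]

-- In-range clamped read is just getD (used in the equal-length case).
lemma pv_clamp_eq_getD (a : List Char) (i : Nat) (hi : i < a.length) :
    (PySem.List.pyGet? a (min (i : Int) ((a.length : Int) - 1))).getD ' ' = a.getD i ' ' := by
  have hmin : min (i : Int) ((a.length : Int) - 1) = (i : Int) := by omega
  rw [hmin, PySem.List.pyGet?_natCast]
  simp [List.getD, hi]

-- Main equality at the list level.
lemma pv_main (a b : List Char) (hpre : a.length = b.length ∨ (a ≠ [] ∧ b ≠ [])) :
    pvGoA a b = (List.range (max a.length b.length)).flatMap (fun (i : Nat) =>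
      [(PySem.List.pyGet? a (min (i : Int) ((a.length : Int) - 1))).getD ' ',
       (PySem.List.pyGet? b (min (i : Int) ((b.length : Int) - 1))).getD ' ']) := by
  rcases Nat.lt_trichotomy a.length b.length with h | h | h
  · -- a shorter (nonempty by Pre_): A pads a and recurses once into the equal case
    have hane : a ≠ [] := by
      rcases hpre with heq | ⟨h1, _⟩
      · exact absurd heq (by omega)
      · exact h1
    have hlen : (a ++ List.replicate (b.length - a.length) ((PySem.List.pyGet? a (-1)).getD ' ')).length = b.length := by
      simp; omega
    rw [pvGoA, if_neg (by omega), if_pos h, pvGoA, if_pos hlen]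
    have hmax : max a.length b.length = b.length := by omega
    rw [hmax, ← pv_range_interleave _ b hlen, hlen]
    apply List.flatMap_congr
    intro i hi
    rw [List.mem_range] at hi
    rw [pv_clamp_eq_pad a b.length hane (by omega) i hi, pv_clamp_eq_getD b i hi]
  · -- equal lengths: no padding, clamped index is in range
    rw [pvGoA, if_pos h]
    have hmax : max a.length b.length = a.length := by omega
    rw [hmax, ← pv_range_interleave a b h]
    apply List.flatMap_congr
    intro i hi
    rw [List.mem_range] at hi
    rw [pv_clamp_eq_getD a i hi, pv_clamp_eq_getD b i (by omega)]
  · -- b shorter: symmetric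
    have hbne : b ≠ [] := by
      rcases hpre with heq | ⟨_, h2⟩
      · exact absurd heq (by omega)
      · exact h2
    have hlen : (b ++ List.replicate (a.length - b.length) ((PySem.List.pyGet? b (-1)).getD ' ')).length = a.length := by
      simp; omega
    rw [pvGoA, if_neg (by omega), if_neg (by omega), pvGoA, if_pos hlen.symm]
    have hmax : max a.length b.length = a.length := by omega
    rw [hmax, ← pv_range_interleave a _ hlen.symm]
    apply List.flatMap_congr
    intro i hi
    rw [List.mem_range] at hi
    rw [pv_clamp_eq_getD a i hi, pv_clamp_eq_pad b a.length hbne (by omega) i hi]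

theorem extendedString_v3_spec : Claim_equal_extendedString_v3 := by
  intro str1 str2 _ hpre
  unfold Spec_extendedString_v3 extendedString_v3 extendedString_v3_alt
  exact congrArg String.mk (pv_main str1.toList str2.toList hpre)
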